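-- pv_equiv track=rewrite | github.com/Ian-Munashe/vcf-splitter | main.py | create_contact_list
-- ===== SOURCE A (Python) =====
-- def create_contact_list(vcf_file):
--     contacts = []
--     contact = ""
--
--     for line in vcf_file:
--         line = line.strip()
--
--         if not line:
--             continue
--
--         if line.startswith("BEGIN:VCARD"):
--             if contact:
--                 contacts.append(contact)
--             contact = line + "\n"
--         else:
--             contact += line + "\n"
--
--     if contact:
--         contacts.append(contact)
--     return contacts
-- ===== SOURCE B (Python) =====
-- def create_contact_list(vcf_file):
--     # pass 1: strip every line and drop the empty ones
--     lines = [s for s in (l.strip() for l in vcf_file) if s]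
--     # pass 2: two-pointer scan splitting the cleaned lines into segments,
--     # a new segment starting at every BEGIN:VCARD line (leading lines form
--     # their own segment)
--     n = len(lines)
--     segments = []
--     i = 0
--     while i < n:
--         j = i + 1
--         while j < n and not lines[j].startswith("BEGIN:VCARD"):
--             j += 1
--         segments.append(lines[i:j])
--         i = j
--     # pass 3: render each segment as one vCard string
--     return ["".join(s + "\n" for s in seg) for seg in segments]
-- ===== Notes on version B (the rewrite author's own statement) =====
-- stated objective: alternative
-- what changed: Replaces A's single stateful flush-on-boundary loop (string accumulator flushed at each BEGIN:VCARD and at the end) with a three-phase pipeline: clean/strip the lines, split them into segments with a two-pointer boundary scan, then join each segment into a vCard string.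
import Mathlib
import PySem

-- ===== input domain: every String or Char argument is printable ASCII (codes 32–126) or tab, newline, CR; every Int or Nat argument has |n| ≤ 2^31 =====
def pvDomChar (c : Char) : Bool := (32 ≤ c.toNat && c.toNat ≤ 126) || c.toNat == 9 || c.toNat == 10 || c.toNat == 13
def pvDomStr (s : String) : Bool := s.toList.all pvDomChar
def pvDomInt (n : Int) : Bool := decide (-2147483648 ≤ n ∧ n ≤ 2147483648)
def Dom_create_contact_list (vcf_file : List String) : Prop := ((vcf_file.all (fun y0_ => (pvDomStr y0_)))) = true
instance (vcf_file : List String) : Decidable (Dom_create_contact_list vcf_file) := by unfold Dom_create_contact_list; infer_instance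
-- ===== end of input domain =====

-- B replaces A's stateful flush-on-boundary loop with a clean → split-into-segments → join pipeline (alternative decomposition, same cost).

-- ===== PORT A =====
-- one iteration of A's for-loop over (contacts, contact)
def pvStepA (st : List String × String) (line : String) : List String × String :=
  let l := PySem.Str.strip line
  if l = "" then st
  else if PySem.Str.startswith l "BEGIN:VCARD" then
    ((if st.2 ≠ "" then st.1 ++ [st.2] else st.1), l ++ "\n")
  else (st.1, st.2 ++ (l ++ "\n"))

def create_contact_list (vcf_file : List String) : List String :=
  let st := vcf_file.foldl pvStepA ([], "")
  if st.2 ≠ "" then st.1 ++ [st.2] else st.1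

-- ===== PORT B =====
-- inner while loop: advance past non-boundary lines; returns (lines[i+1:j], lines[j:])
def pvSpan : List String → (List String × List String)
  | [] => ([], [])
  | x :: xs =>
      if PySem.Str.startswith x "BEGIN:VCARD" then ([], x :: xs)
      else
        let p := pvSpan xs
        (x :: p.1, p.2)

theorem pvSpan_len_le (xs : List String) : (pvSpan xs).2.length ≤ xs.length := by
  induction xs with
  | nil => simp [pvSpan]
  | cons x xs ih =>
      simp only [pvSpan]
      split
      · simp
      · simpa using Nat.le_succ_of_le ih

-- outer while loop: peel one segment at a time
def pvSplitSegs : List String → List (List String)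
  | [] => []
  | x :: xs =>
      let p := pvSpan xs
      (x :: p.1) :: pvSplitSegs p.2
  termination_by ls => ls.length
  decreasing_by
    simpa using Nat.lt_succ_of_le (pvSpan_len_le xs)

def create_contact_list_alt (vcf_file : List String) : List String :=
  let lines := (vcf_file.map PySem.Str.strip).filter (fun s => decide (s ≠ ""))
  (pvSplitSegs lines).map (fun seg => PySem.Str.join "" (seg.map (fun s => s ++ "\n")))

-- ===== PRECONDITION & SPEC =====
def Spec_create_contact_list (vcf_file : List String) (out : List String) : Prop := out = create_contact_list_alt vcf_file
instance (vcf_file : List String) (out : List String) : Decidable (Spec_create_contact_list vcf_file out) := by unfold Spec_create_contact_list; infer_instance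

-- ===== CLAIM (what is proved, stated in full; the proofs are below) =====
def Claim_equal_create_contact_list : Prop := ∀ (vcf_file : List String), Dom_create_contact_list vcf_file → Spec_create_contact_list vcf_file (create_contact_list vcf_file)

-- ===== LEMMAS AND PROOFS =====

-- A's loop step on an already-stripped nonempty line
def pvStepA' (st : List String × String) (l : String) : List String × String :=
  if PySem.Str.startswith l "BEGIN:VCARD" then
    ((if st.2 ≠ "" then st.1 ++ [st.2] else st.1), l ++ "\n")
  else (st.1, st.2 ++ (l ++ "\n"))

-- A's final flush
def pvFinish (st : List String × String) : List String :=
  if st.2 ≠ "" then st.1 ++ [st.2] else st.1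

-- records A still emits given pending partial record c
def pvCont (c : String) : List String → List String
  | [] => [c]
  | x :: xs =>
      if PySem.Str.startswith x "BEGIN:VCARD" then c :: pvCont (x ++ "\n") xs
      else pvCont (c ++ (x ++ "\n")) xs

def pvJoin1 (seg : List String) : String := PySem.Str.join "" (seg.map (fun s => s ++ "\n"))

theorem pvAppend_nl_ne (s : String) : s ++ "\n" ≠ "" := by
  intro h; have := congrArg String.length h; simp at this

theorem pvAppend_append_nl_ne (a b : String) : a ++ (b ++ "\n") ≠ "" := by
  intro h; have := congrArg String.length h; simp at this

theorem pvJoin1_nil : pvJoin1 [] = "" := by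
  apply String.toList_inj.mp
  simp [pvJoin1, PySem.Chars.join_nil]

theorem pvJoin1_cons (x : String) (t : List String) :
    pvJoin1 (x :: t) = (x ++ "\n") ++ pvJoin1 t := by
  apply String.toList_inj.mp
  cases t <;>
    simp [pvJoin1, PySem.Chars.join_singleton, PySem.Chars.join_cons_cons, PySem.Chars.join_nil]

theorem pvJoin1_snoc (t : List String) (x : String) :
    pvJoin1 (t ++ [x]) = pvJoin1 t ++ (x ++ "\n") := by
  induction t with
  | nil => simp [pvJoin1_cons, pvJoin1_nil]
  | cons a t ih => simp [pvJoin1_cons, ih, String.append_assoc]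

-- Phase 1: A's loop over raw lines = the stripped loop over the cleaned list
theorem pvFoldA_clean (vcf : List String) (st : List String × String) :
    vcf.foldl pvStepA st =
      ((vcf.map PySem.Str.strip).filter (fun s => decide (s ≠ ""))).foldl pvStepA' st := by
  induction vcf generalizing st with
  | nil => rfl
  | cons l vcf ih =>
      by_cases h : PySem.Str.strip l = ""
      · simp [List.foldl_cons, pvStepA, h, ih]
      · simp [List.foldl_cons, pvStepA, pvStepA', h, ih]

-- Phase 2: with a nonempty pending record, A's remaining loop produces pvCont
theorem pvFoldA'_cont (ls : List String) (c : String) (cs : List String) (hc : c ≠ "") :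
    pvFinish (ls.foldl pvStepA' (cs, c)) = cs ++ pvCont c ls := by
  induction ls generalizing c cs with
  | nil => simp [pvFinish, hc, pvCont]
  | cons x xs ih =>
      by_cases hb : PySem.Str.startswith x "BEGIN:VCARD"
      all_goals simp at hb
      · rw [List.foldl_cons,
          show pvStepA' (cs, c) x = (cs ++ [c], x ++ "\n") by simp [pvStepA', hb, hc],
          ih (x ++ "\n") (cs ++ [c]) (pvAppend_nl_ne x),
          show pvCont c (x :: xs) = c :: pvCont (x ++ "\n") xs by simp [pvCont, hb]]
        simp
      · rw [List.foldl_cons,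
          show pvStepA' (cs, c) x = (cs, c ++ (x ++ "\n")) by simp [pvStepA', hb],
          ih (c ++ (x ++ "\n")) cs (pvAppend_append_nl_ne c x),
          show pvCont c (x :: xs) = pvCont (c ++ (x ++ "\n")) xs by simp [pvCont, hb]]

-- Phase 3: pvCont of a partial segment = B's segment splitting, joined
theorem pvSplitSegs_nil : pvSplitSegs [] = [] := by rw [pvSplitSegs]

theorem pvSplitSegs_cons (x : String) (xs : List String) :
    pvSplitSegs (x :: xs) = (x :: (pvSpan xs).1) :: pvSplitSegs (pvSpan xs).2 := by
  rw [pvSplitSegs]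

theorem pvCont_split (xs : List String) (seg : List String) :
    pvCont (pvJoin1 seg) xs =
      pvJoin1 (seg ++ (pvSpan xs).1) :: (pvSplitSegs (pvSpan xs).2).map pvJoin1 := by
  induction xs generalizing seg with
  | nil => simp [pvCont, pvSpan, pvSplitSegs_nil]
  | cons x xs ih =>
      by_cases hb : PySem.Str.startswith x "BEGIN:VCARD"
      all_goals simp at hb
      · have hx : (x ++ "\n") = pvJoin1 [x] := by
          simp [pvJoin1_cons, pvJoin1_nil]
        rw [show pvCont (pvJoin1 seg) (x :: xs) = pvJoin1 seg :: pvCont (x ++ "\n") xs from by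
            simp [pvCont, hb],
          show pvSpan (x :: xs) = ([], x :: xs) from by simp [pvSpan, hb],
          hx, ih [x], pvSplitSegs_cons]
        simp
      · have hx : pvJoin1 seg ++ (x ++ "\n") = pvJoin1 (seg ++ [x]) := (pvJoin1_snoc seg x).symm
        rw [show pvCont (pvJoin1 seg) (x :: xs) = pvCont (pvJoin1 seg ++ (x ++ "\n")) xs from by
            simp [pvCont, hb],
          show pvSpan (x :: xs) = (x :: (pvSpan xs).1, (pvSpan xs).2) from by simp [pvSpan, hb],
          hx, ih (seg ++ [x])]
        simp

-- Phase 2+3 from the empty start state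
theorem pvFoldA'_split (ls : List String) :
    pvFinish (ls.foldl pvStepA' ([], "")) = (pvSplitSegs ls).map pvJoin1 := by
  cases ls with
  | nil => simp [pvFinish, pvSplitSegs_nil]
  | cons x xs =>
      have hstep : pvStepA' ([], "") x = ([], x ++ "\n") := by
        by_cases hb : PySem.Str.startswith x "BEGIN:VCARD" <;>
          simp at hb <;> simp [pvStepA', hb]
      rw [List.foldl_cons, hstep,
        pvFoldA'_cont xs (x ++ "\n") [] (pvAppend_nl_ne x)]
      have hx : (x ++ "\n") = pvJoin1 [x] := by simp [pvJoin1_cons, pvJoin1_nil]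
      rw [hx, pvCont_split xs [x]]
      simp [pvSplitSegs_cons]

-- ===== VERDICT (by name: the statement is the Claim_ definition above) =====
theorem create_contact_list_spec : Claim_equal_create_contact_list := by
  intro vcf _
  unfold Spec_create_contact_list create_contact_list create_contact_list_alt
  show pvFinish (vcf.foldl pvStepA ([], "")) = _
  rw [pvFoldA_clean vcf ([], ""), pvFoldA'_split]
  rfl
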